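-- pv_equiv track=rewrite | github.com/miliar/Code_Jam_Webscraper | solutions_python/Problem_207/160.py | solve_lms
-- ===== SOURCE A (Python) =====
-- def solve_lms(i_l, i_m, i_s):
--     l = i_l
--     m = i_m
--     s = i_s
--     entries = [0, 1, 2] * s
--
--     l -= s
--     m -= s
--     s = 0
--
--     while m > 0:
--         entries.insert(0, 1)
--         entries.insert(0, 0)
--         m -= 1
--         l -= 1
--
--     while l > 0:
--         found = False
--         for i in range(len(entries)-1):
--             if entries[i] == 1 and entries[i+1] == 2:
--                 entries.insert(i+1, 0)
--                 l -= 1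
--                 found = True
--                 break
--         if not found:
--             return None
--
--     return entries
-- ===== SOURCE B (Python) =====
-- def solve_lms(i_l, i_m, i_s):
--     # Direct construction: A's loops always produce [0,1]*m2 ++ [0,1,0,2]*k ++ [0,1,2]*(s0-k)
--     s0 = max(i_s, 0)
--     m2 = max(i_m - i_s, 0)
--     r = i_l - i_s - m2
--     if r > s0:
--         return None
--     k = max(r, 0)
--     return [0, 1] * m2 + [0, 1, 0, 2] * k + [0, 1, 2] * (s0 - k)
-- ===== Notes on version B (the rewrite author's own statement) =====
-- stated objective: faster
-- what changed: Replaces the two simulation loops (prepend loop plus repeated linear scan-and-insert into a growing list) by a closed-form direct construction [0,1]*m2 + [0,1,0,2]*k + [0,1,2]*(s0-k), returning None exactly when the remaining l exceeds the available blocks.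
import Mathlib
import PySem

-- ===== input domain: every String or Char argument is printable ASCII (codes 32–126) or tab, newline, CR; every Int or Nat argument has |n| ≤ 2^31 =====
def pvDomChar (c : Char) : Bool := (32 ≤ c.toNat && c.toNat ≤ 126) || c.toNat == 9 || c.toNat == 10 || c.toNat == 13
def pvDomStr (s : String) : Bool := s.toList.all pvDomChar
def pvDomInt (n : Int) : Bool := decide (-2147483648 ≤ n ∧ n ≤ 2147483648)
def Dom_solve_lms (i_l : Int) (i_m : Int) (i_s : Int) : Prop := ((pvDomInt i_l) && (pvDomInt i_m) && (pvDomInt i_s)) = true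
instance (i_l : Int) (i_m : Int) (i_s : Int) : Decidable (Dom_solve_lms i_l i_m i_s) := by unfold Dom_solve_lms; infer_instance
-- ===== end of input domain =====

-- ===== PORT A =====
-- B replaces A's two simulation loops by a direct closed-form construction.

-- while m > 0: entries.insert(0,1); entries.insert(0,0); m -= 1; l -= 1
def pvLoopM (m l : Int) (entries : List Int) : Int × List Int :=
  if m > 0 then
    pvLoopM (m - 1) (l - 1) (PySem.List.insert (PySem.List.insert entries 0 1) 0 0)
  else (l, entries)
termination_by m.toNat
decreasing_by omega

-- for i in range(len(entries)-1): if entries[i] == 1 and entries[i+1] == 2: <found at i, break>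
def pvFind : List Int → Nat → Option Nat
  | x :: y :: rest, i => if x = 1 ∧ y = 2 then some i else pvFind (y :: rest) (i + 1)
  | _, _ => none

-- while l > 0: find the first adjacent (1,2), insert 0 between them; if none found, return None
def pvLoopL (l : Int) (entries : List Int) : Option (List Int) :=
  if l > 0 then
    match pvFind entries 0 with
    | some i => pvLoopL (l - 1) (PySem.List.insert entries ((i : Int) + 1) 0)
    | none => none
  else some entries
termination_by l.toNat
decreasing_by omega

def solve_lms (i_l : Int) (i_m : Int) (i_s : Int) : Option (List Int) :=
  let entries := List.flatten (List.replicate i_s.toNat [0, 1, 2])  -- [0, 1, 2] * s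
  let p := pvLoopM (i_m - i_s) (i_l - i_s) entries
  pvLoopL p.1 p.2

-- ===== PORT B =====
-- xs * n  (Python list repetition; empty for n <= 0)
def pvRep (xs : List Int) (n : Int) : List Int :=
  List.flatten (List.replicate n.toNat xs)

def solve_lms_alt (i_l : Int) (i_m : Int) (i_s : Int) : Option (List Int) :=
  let s0 := max i_s 0
  let m2 := max (i_m - i_s) 0
  let r := i_l - i_s - m2
  if r > s0 then none
  else
    let k := max r 0
    some (pvRep [0, 1] m2 ++ pvRep [0, 1, 0, 2] k ++ pvRep [0, 1, 2] (s0 - k))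

-- ===== PRECONDITION & SPEC =====
def Spec_solve_lms (i_l : Int) (i_m : Int) (i_s : Int) (out : Option (List Int)) : Prop := out = solve_lms_alt i_l i_m i_s
instance (i_l : Int) (i_m : Int) (i_s : Int) (out : Option (List Int)) : Decidable (Spec_solve_lms i_l i_m i_s out) := by unfold Spec_solve_lms; infer_instance

-- ===== CLAIM (what is proved, stated in full; the proofs are below) =====
def Claim_equal_solve_lms : Prop := ∀ (i_l : Int) (i_m : Int) (i_s : Int), Dom_solve_lms i_l i_m i_s → Spec_solve_lms i_l i_m i_s (solve_lms i_l i_m i_s)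

-- ===== LEMMAS AND PROOFS =====

-- every intermediate entries list of A: a [0,1]-prefix, b filled blocks, c unfilled blocks
def pvShape (a b c : Nat) : List Int :=
  List.flatten (List.replicate a [0, 1]) ++ List.flatten (List.replicate b [0, 1, 0, 2]) ++
    List.flatten (List.replicate c [0, 1, 2])

theorem pvFlatten_rep_succ (xs : List Int) (n : Nat) :
    List.flatten (List.replicate (n + 1) xs) = List.flatten (List.replicate n xs) ++ xs := by
  rw [List.replicate_succ']; simp

theorem pvLoopM_eq (n : Nat) : ∀ (m : Int), m.toNat = n → ∀ (l : Int) (e : List Int),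
    pvLoopM m l e = (l - m.toNat, List.flatten (List.replicate m.toNat [0, 1]) ++ e) := by
  induction n with
  | zero =>
    intro m hm l e
    rw [pvLoopM, if_neg (by omega)]
    simp [hm]
  | succ k ih =>
    intro m hm l e
    rw [pvLoopM, if_pos (by omega), ih (m - 1) (by omega)]
    have h1 : (m - 1).toNat = k := by omega
    rw [hm, h1, pvFlatten_rep_succ]
    rw [Prod.mk.injEq]
    exact ⟨by omega, by simp [PySem.List.insert_zero]⟩

theorem pvFind_skip01 (t : List Int) (i : Nat) (h : t.head? ≠ some 2) :
    pvFind (0 :: 1 :: t) i = pvFind t (i + 2) := by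
  cases t with
  | nil => simp [pvFind]
  | cons y t' =>
    have hy : ¬ (y = 2) := by intro hh; rw [hh] at h; simp at h
    simp only [pvFind, show ¬((0:Int) = 1 ∧ (1:Int) = 2) by decide, if_false, hy]
    congr 1

theorem pvFind_skipFilled (t : List Int) (i : Nat) :
    pvFind (0 :: 1 :: 0 :: 2 :: t) i = pvFind t (i + 4) := by
  cases t with
  | nil => simp [pvFind]
  | cons y t' =>
    simp only [pvFind, show ¬((0:Int) = 1 ∧ (1:Int) = 2) by decide,
      show ¬((2:Int) = 1 ∧ y = 2) by simp, if_false]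
    congr 1

theorem pvHead_rep01_append (a : Nat) (rest : List Int) (h : rest.head? ≠ some 2) :
    (List.flatten (List.replicate a [0, 1]) ++ rest).head? ≠ some 2 := by
  cases a with
  | zero => simpa using h
  | succ k => simp [List.replicate_succ]

theorem pvFind_rep01 (a : Nat) : ∀ (rest : List Int) (i : Nat), rest.head? ≠ some 2 →
    pvFind (List.flatten (List.replicate a [0, 1]) ++ rest) i = pvFind rest (i + 2 * a) := by
  induction a with
  | zero => intro rest i _; simp
  | succ k ih =>
    intro rest i h
    rw [List.replicate_succ]
    simp only [List.flatten_cons, List.cons_append, List.nil_append]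
    rw [pvFind_skip01 _ _ (pvHead_rep01_append k rest h), ih rest _ h]
    congr 1; omega

theorem pvFind_repFilled (b : Nat) : ∀ (rest : List Int) (i : Nat),
    pvFind (List.flatten (List.replicate b [0, 1, 0, 2]) ++ rest) i = pvFind rest (i + 4 * b) := by
  induction b with
  | zero => intro rest i; simp
  | succ k ih =>
    intro rest i
    rw [List.replicate_succ]
    simp only [List.flatten_cons, List.cons_append, List.nil_append]
    rw [pvFind_skipFilled, ih]
    congr 1; omega

theorem pvHead_repFilled_append (b : Nat) (rest : List Int) (h : rest.head? ≠ some 2) :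
    (List.flatten (List.replicate b [0, 1, 0, 2]) ++ rest).head? ≠ some 2 := by
  cases b with
  | zero => simpa using h
  | succ k => simp [List.replicate_succ]

theorem pvFind_hit (t : List Int) (i : Nat) : pvFind (0 :: 1 :: 2 :: t) i = some (i + 1) := by
  simp only [pvFind, show ¬((0:Int) = 1 ∧ (1:Int) = 2) by decide, if_false]
  simp

theorem pvFind_shape_succ (a b c : Nat) :
    pvFind (pvShape a b (c + 1)) 0 = some (2 * a + 4 * b + 1) := by
  unfold pvShape
  rw [List.append_assoc]
  rw [pvFind_rep01 a _ 0 (pvHead_repFilled_append b _ (by simp [List.replicate_succ]))]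
  rw [pvFind_repFilled b _ _]
  rw [List.replicate_succ]
  simp only [List.flatten_cons, List.cons_append, List.nil_append]
  rw [pvFind_hit]
  congr 1
  omega

theorem pvFind_shape_zero (a b : Nat) : pvFind (pvShape a b 0) 0 = none := by
  unfold pvShape
  rw [List.append_assoc]
  rw [pvFind_rep01 a _ 0 (pvHead_repFilled_append b _ (by simp))]
  rw [pvFind_repFilled b _ _]
  simp [pvFind]

theorem pvInsert_shape (a b c : Nat) :
    PySem.List.insert (pvShape a b (c + 1)) (((2 * a + 4 * b + 1 : Nat) : Int) + 1) 0 =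
      pvShape a (b + 1) c := by
  have hlen : (pvShape a b (c + 1)).length = 2 * a + 4 * b + 3 * (c + 1) := by
    simp [pvShape]; ring
  have hcast : ((2 * a + 4 * b + 1 : Nat) : Int) + 1 = ((2 * a + 4 * b + 2 : Nat) : Int) := by
    push_cast; ring
  rw [hcast, PySem.List.insert_natCast _ _ _ (by omega)]
  have hP : (List.flatten (List.replicate a ([0, 1] : List Int)) ++
      List.flatten (List.replicate b ([0, 1, 0, 2] : List Int))).length = 2 * a + 4 * b := by
    simp; ring
  have hshape : pvShape a b (c + 1) =
      (List.flatten (List.replicate a [0, 1]) ++ List.flatten (List.replicate b [0, 1, 0, 2])) ++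
        (0 :: 1 :: 2 :: List.flatten (List.replicate c [0, 1, 2])) := by
    simp only [pvShape, List.replicate_succ, List.flatten_cons, List.append_assoc,
      List.cons_append, List.nil_append]
  rw [hshape]
  generalize hPdef : List.flatten (List.replicate a ([0, 1] : List Int)) ++
      List.flatten (List.replicate b ([0, 1, 0, 2] : List Int)) = P at hP ⊢
  rw [List.take_append, List.drop_append, List.take_of_length_le (by omega),
    List.drop_eq_nil_of_le (by omega), hP]
  rw [show 2 * a + 4 * b + 2 - (2 * a + 4 * b) = 2 by omega]
  simp only [pvShape, pvFlatten_rep_succ, ← hPdef]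
  simp

theorem pvLoopL_shape (n : Nat) : ∀ (l : Int), l.toNat = n → ∀ (a b c : Nat),
    pvLoopL l (pvShape a b c) =
      if l ≤ (c : Int) then some (pvShape a (b + l.toNat) (c - l.toNat)) else none := by
  induction n with
  | zero =>
    intro l hl a b c
    rw [pvLoopL, if_neg (by omega), if_pos (by omega)]
    simp [hl]
  | succ k ih =>
    intro l hl a b c
    rw [pvLoopL, if_pos (by omega)]
    cases c with
    | zero =>
      rw [pvFind_shape_zero, if_neg (by push_cast; omega)]
    | succ c' =>
      rw [pvFind_shape_succ]
      dsimp only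
      rw [pvInsert_shape, ih (l - 1) (by omega)]
      by_cases hle : l ≤ ((c' + 1 : Nat) : Int)
      · rw [if_pos (by push_cast at hle ⊢; omega), if_pos hle]
        congr 1
        have e1 : b + 1 + (l - 1).toNat = b + l.toNat := by omega
        have e2 : c' - (l - 1).toNat = c' + 1 - l.toNat := by omega
        rw [e1, e2]
      · rw [if_neg (by push_cast at hle ⊢; omega), if_neg hle]

theorem solve_lms_eq (i_l i_m i_s : Int) : solve_lms i_l i_m i_s = solve_lms_alt i_l i_m i_s := by
  simp only [solve_lms, solve_lms_alt]
  rw [pvLoopM_eq (i_m - i_s).toNat (i_m - i_s) rfl]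
  have hshape0 : List.flatten (List.replicate (i_m - i_s).toNat ([0, 1] : List Int)) ++
      List.flatten (List.replicate i_s.toNat ([0, 1, 2] : List Int)) =
      pvShape (i_m - i_s).toNat 0 i_s.toNat := by
    simp [pvShape]
  simp only [hshape0]
  rw [pvLoopL_shape (i_l - i_s - (i_m - i_s).toNat).toNat _ rfl]
  have hm2 : max (i_m - i_s) 0 = ((i_m - i_s).toNat : Int) := (Int.ofNat_toNat _).symm
  have hs0 : max i_s 0 = (i_s.toNat : Int) := (Int.ofNat_toNat _).symm
  rw [hm2, hs0]
  set r : Int := i_l - i_s - ((i_m - i_s).toNat : Int) with hr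
  by_cases hle : r ≤ ((i_s.toNat : Nat) : Int)
  · rw [if_pos hle, if_neg (by omega)]
    congr 1
    unfold pvShape pvRep
    have e2 : (max r 0).toNat = r.toNat := by rw [← Int.ofNat_toNat r]; omega
    have e3 : (((i_s.toNat : Nat) : Int) - max r 0).toNat = i_s.toNat - r.toNat := by
      rw [← Int.ofNat_toNat r]; omega
    rw [e2, e3, Int.toNat_natCast]
    simp
  · rw [if_neg hle, if_pos (by omega)]

-- ===== VERDICT (by name: the statement is the Claim_ definition above) =====
theorem solve_lms_spec : Claim_equal_solve_lms := by
  intro i_l i_m i_s _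
  unfold Spec_solve_lms
  exact solve_lms_eq i_l i_m i_s
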